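-- pv_equiv track=rewrite | github.com/SohumKaji/Algorithms | Exam Rush/exam_rush.py | examRush
-- ===== SOURCE A (Python) =====
-- def examRush(tm, t):
--     #Sort in ascending order
--     tm = sorted(tm)
--     ans = 0
--
--     #While there is still a course to test
--     while(len(tm) >0):
--         t-=tm.pop(0)
--         #Subtract the amount of time to study the current subject
--         #from the total time
--         if(t < 0):
--             #If that takes our time below 0, we cannot study it
--             break
--
--         #Since we had time, we study it and move on to the next subject
--         ans +=1
--
--     return ans
-- ===== SOURCE B (Python) =====
-- def examRush(tm, t):
--     # Build the prefix-sum table of the ascending-sorted times,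
--     # then count the leading prefix sums that fit within t.
--     total = 0
--     prefix = []
--     for x in sorted(tm):
--         total += x
--         prefix.append(total)
--     k = 0
--     while k < len(prefix) and prefix[k] <= t:
--         k += 1
--     return k
-- ===== Notes on version B (the rewrite author's own statement) =====
-- stated objective: faster
-- what changed: Replaces the destructive pop-from-front loop with running subtraction by a prefix-sum table over the sorted times plus a scan counting the leading sums that fit; the input list is not mutated.
import Mathlib
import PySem

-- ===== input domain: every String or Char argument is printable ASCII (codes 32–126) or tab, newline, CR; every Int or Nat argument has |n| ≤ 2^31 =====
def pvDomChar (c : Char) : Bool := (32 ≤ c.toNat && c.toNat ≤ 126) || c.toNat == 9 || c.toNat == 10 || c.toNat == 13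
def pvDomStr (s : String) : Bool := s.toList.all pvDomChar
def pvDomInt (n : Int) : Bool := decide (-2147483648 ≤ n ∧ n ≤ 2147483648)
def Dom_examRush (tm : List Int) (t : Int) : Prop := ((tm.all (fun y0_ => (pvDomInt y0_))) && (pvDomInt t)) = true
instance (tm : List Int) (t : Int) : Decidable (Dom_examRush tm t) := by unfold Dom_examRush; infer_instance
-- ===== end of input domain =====

-- B replaces A's destructive pop-from-front subtraction loop by a prefix-sum table plus a
-- leading-count scan avoiding the quadratic pop(0); B does not mutate the input list (A mutates only its local sorted copy).

-- ===== PORT A =====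
-- while len(tm) > 0: t -= tm.pop(0); if t < 0: break; ans += 1
def examRushLoop : List Int → Int → Int → Int
  | [], _, ans => ans
  | x :: xs, t, ans =>
      let t' := t - x
      if t' < 0 then ans else examRushLoop xs t' (ans + 1)

def examRush (tm : List Int) (t : Int) : Int :=
  examRushLoop (PySem.List.sorted tm (fun x => x) false) t 0

-- ===== PORT B =====
-- for x in sorted(tm): total += x; prefix.append(total)
def examRushPrefix : List Int → Int → List Int
  | [], _ => []
  | x :: xs, total => (total + x) :: examRushPrefix xs (total + x)

-- while k < len(prefix) and prefix[k] <= t: k += 1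
def examRushCount : List Int → Int → Int
  | [], _ => 0
  | p :: ps, t => if p ≤ t then 1 + examRushCount ps t else 0

def examRush_alt (tm : List Int) (t : Int) : Int :=
  examRushCount (examRushPrefix (PySem.List.sorted tm (fun x => x) false) 0) t

-- ===== PRECONDITION & SPEC =====
def Spec_examRush (tm : List Int) (t : Int) (out : Int) : Prop := out = examRush_alt tm t
instance (tm : List Int) (t : Int) (out : Int) : Decidable (Spec_examRush tm t out) := by unfold Spec_examRush; infer_instance

-- ===== CLAIM (what is proved, stated in full; the proofs are below) =====
def Claim_equal_examRush : Prop := ∀ (tm : List Int) (t : Int), Dom_examRush tm t → Spec_examRush tm t (examRush tm t)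

-- ===== LEMMAS AND PROOFS =====

theorem examRushPrefix_shift (l : List Int) (c : Int) :
    examRushPrefix l c = (examRushPrefix l 0).map (· + c) := by
  induction l generalizing c with
  | nil => rfl
  | cons x xs ih =>
      simp only [examRushPrefix, List.map_cons, List.map_map, ih (c + x), ih (0 + x)]
      refine congrArg₂ List.cons (by omega) ?_
      apply List.map_congr_left; intro a _; simp [Function.comp]; omega

theorem examRushCount_map (l : List Int) (c t : Int) :
    examRushCount (l.map (· + c)) t = examRushCount l (t - c) := by
  induction l with
  | nil => rfl
  | cons p ps ih =>
      simp [examRushCount, ih]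
      have : p + c ≤ t ↔ p ≤ t - c := by omega
      simp [this]

theorem examRushLoop_eq (l : List Int) (t ans : Int) :
    examRushLoop l t ans = ans + examRushCount (examRushPrefix l 0) t := by
  induction l generalizing t ans with
  | nil => simp [examRushLoop, examRushPrefix, examRushCount]
  | cons x xs ih =>
      simp only [examRushLoop, examRushPrefix]
      rw [examRushPrefix_shift xs (0 + x)]
      simp only [examRushCount, examRushCount_map]
      by_cases h : t - x < 0
      · have hx : ¬ (x ≤ t) := by omega
        simp [h, hx]
      · have hx : x ≤ t := by omega
        simp [h, hx, ih]
        omega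

-- ===== VERDICT (by name: the statement is the Claim_ definition above) =====
theorem examRush_spec : Claim_equal_examRush := by
  intro tm t _
  unfold Spec_examRush examRush examRush_alt
  rw [examRushLoop_eq]
  omega
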